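-- pv_equiv track=rewrite | github.com/nedhub/capitalone | arcade/matrixElementsSum.py | solution
-- ===== SOURCE A (Python) =====
-- def solution(matrix):
--     sum_matrix = 0
--
--     haunted_room = list()
--     for i in range(0, len(matrix)):
--         for j in range(len(matrix[0])):
--             if matrix[i][j] == 0:
--                 haunted_room.append(j)
--         for k in range(len(matrix[0])):
--
--             if k not in haunted_room:
--                 sum_matrix += matrix[i][k]
--
--     return sum_matrix
-- ===== SOURCE B (Python) =====
-- def solution(matrix):
--     if not matrix:
--         return 0
--     total = 0
--     for j in range(len(matrix[0])):
--         for row in matrix: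
--             v = row[j]
--             if v == 0:
--                 break
--             total += v
--     return total
-- ===== Notes on version B (the rewrite author's own statement) =====
-- stated objective: simpler
-- what changed: column-major walk that breaks at the first zero in each column, instead of row-major accumulation of a growing haunted-column list that is re-scanned for every cell
import Mathlib
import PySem

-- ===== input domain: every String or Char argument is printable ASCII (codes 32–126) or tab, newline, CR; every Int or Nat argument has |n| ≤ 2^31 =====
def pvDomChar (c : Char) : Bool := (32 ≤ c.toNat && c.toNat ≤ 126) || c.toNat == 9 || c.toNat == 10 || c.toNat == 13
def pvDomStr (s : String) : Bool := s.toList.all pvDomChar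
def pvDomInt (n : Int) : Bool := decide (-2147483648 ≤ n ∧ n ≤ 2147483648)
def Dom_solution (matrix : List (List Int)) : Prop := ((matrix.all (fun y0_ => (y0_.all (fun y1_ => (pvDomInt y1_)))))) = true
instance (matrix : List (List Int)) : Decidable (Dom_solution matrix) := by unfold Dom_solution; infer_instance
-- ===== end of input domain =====

-- B replaces A's row-major loop with a growing haunted-column list by a column-major
-- walk that stops each column at its first zero (objective: simpler).

-- ===== PORT A =====
-- body of A's outer loop over rows (the two inner 'for j/for k in range(len(matrix[0]))' loops)
def solRowStep (n : Int) (st : Int × List Int) (row : List Int) : Int × List Int :=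
  let h := (PySem.List.pyRange 0 n 1).foldl
    (fun h j => if PySem.List.pyGetD row j 0 = 0 then h ++ [j] else h) st.2
  let s := (PySem.List.pyRange 0 n 1).foldl
    (fun s k => if k ∈ h then s else s + PySem.List.pyGetD row k 0) st.1
  (s, h)

def solution (matrix : List (List Int)) : Int :=
  ((PySem.List.pyRange 0 matrix.length 1).foldl
      (fun st i => solRowStep ((PySem.List.pyGetD matrix 0 []).length : Int) st
        (PySem.List.pyGetD matrix i []))
      ((0 : Int), ([] : List Int))).1

-- ===== PORT B =====
-- column j of the rows, summed until (excluding) the first zero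
def colUntilZero (j : Nat) : List (List Int) → Int
  | [] => 0
  | r :: rs => let v := r.getD j 0; if v = 0 then 0 else v + colUntilZero j rs

def solution_alt (matrix : List (List Int)) : Int :=
  if matrix = [] then 0
  else (List.range (matrix.headD []).length).foldl (fun s j => s + colUntilZero j matrix) 0

-- ===== PRECONDITION & SPEC =====
-- Pre_ excludes ragged matrices with a row shorter than the first row: there the
-- Python A raises IndexError (it reads matrix[i][j] for every j < len(matrix[0])).
def Pre_solution (matrix : List (List Int)) : Prop :=
  ∀ row ∈ matrix, (matrix.headD []).length ≤ row.length
instance (matrix : List (List Int)) : Decidable (Pre_solution matrix) := by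
  unfold Pre_solution; infer_instance

def pvWitness_solution : List (List Int) := [[1, 2, 0], [0, 5, 6], [7, 8, 9]]

def Spec_solution (matrix : List (List Int)) (out : Int) : Prop := out = solution_alt matrix
instance (matrix : List (List Int)) (out : Int) : Decidable (Spec_solution matrix out) := by unfold Spec_solution; infer_instance

-- ===== CLAIM (what is proved, stated in full; the proofs are below) =====
def Claim_equal_solution : Prop := ∀ (matrix : List (List Int)), Dom_solution matrix → Pre_solution matrix → Spec_solution matrix (solution matrix)

-- ===== LEMMAS AND PROOFS =====

-- row-wise restatement of A's state
def zr (n : Nat) (row : List Int) : List Int :=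
  ((List.range n).filter (fun k => row.getD k 0 == 0)).map Int.ofNat

def rowAdd (n : Nat) (row : List Int) (h : List Int) : Int :=
  (((List.range n).filter (fun (k : Nat) => ¬ ((k : Int) ∈ h))).map (fun k => row.getD k 0)).sum

def Astate (n : Nat) (rows : List (List Int)) : Int × List Int :=
  rows.foldl (fun st r => (st.1 + rowAdd n r (st.2 ++ zr n r), st.2 ++ zr n r)) (0, [])

-- whether column j of the processed rows contains a zero
def zeroInCol (rows : List (List Int)) (j : Nat) : Bool := rows.any (fun r => r.getD j 0 == 0)

lemma innerH (n : Nat) (row : List Int) (h0 : List Int) :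
    (PySem.List.pyRange 0 (n : Int) 1).foldl
      (fun h j => if PySem.List.pyGetD row j 0 = 0 then h ++ [j] else h) h0
    = h0 ++ zr n row := by
  rw [PySem.List.pyRange_zero_natCast, List.foldl_map]
  unfold zr
  induction n generalizing h0 with
  | zero => simp
  | succ m ih =>
    rw [List.range_succ, List.foldl_append, List.filter_append, List.map_append, ih]
    by_cases hz : row[m]?.getD 0 = 0 <;>
      simp [PySem.List.pyGetD_natCast, List.getD_eq_getElem?_getD, hz, List.append_assoc]

lemma innerS (n : Nat) (row : List Int) (h : List Int) (s0 : Int) :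
    (PySem.List.pyRange 0 (n : Int) 1).foldl
      (fun s k => if k ∈ h then s else s + PySem.List.pyGetD row k 0) s0
    = s0 + rowAdd n row h := by
  rw [PySem.List.pyRange_zero_natCast, List.foldl_map]
  unfold rowAdd
  induction n generalizing s0 with
  | zero => simp
  | succ m ih =>
    rw [List.range_succ, List.foldl_append, List.filter_append, List.map_append,
      List.sum_append, ih]
    by_cases hm : ((m : Int)) ∈ h <;> simp [hm, PySem.List.pyGetD_natCast]
    ring

lemma solRowStep_eq (n : Nat) (st : Int × List Int) (row : List Int) :
    solRowStep (n : Int) st row = (st.1 + rowAdd n row (st.2 ++ zr n row), st.2 ++ zr n row) := by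
  simp only [solRowStep, innerH, innerS]

lemma solution_eq_Astate (matrix : List (List Int)) :
    solution matrix = (Astate (matrix.headD []).length matrix).1 := by
  unfold solution Astate
  rw [PySem.List.foldl_pyRange_zero_pyGetD' matrix []
    (fun st row => solRowStep ((PySem.List.pyGetD matrix 0 []).length : Int) st row) (0, [])]
  have hn : (PySem.List.pyGetD matrix 0 []).length = (matrix.headD []).length := by
    cases matrix <;> simp [PySem.List.pyGetD_zero]
  rw [hn]
  simp only [solRowStep_eq]

lemma Astate_snd (n : Nat) (rows : List (List Int)) :
    (Astate n rows).2 = (rows.map (zr n)).flatten := by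
  have : ∀ (st : Int × List Int),
      (rows.foldl (fun st r => (st.1 + rowAdd n r (st.2 ++ zr n r), st.2 ++ zr n r)) st).2
      = st.2 ++ (rows.map (zr n)).flatten := by
    induction rows with
    | nil => simp
    | cons r t ih => intro st; simp [ih, List.append_assoc]
  simpa using this (0, [])

lemma mem_flat_zr (n : Nat) (rows : List (List Int)) (k : Nat) :
    ((k : Int) ∈ (rows.map (zr n)).flatten) ↔ (k < n ∧ zeroInCol rows k = true) := by
  simp only [List.mem_flatten, List.mem_map, zr, zeroInCol, List.any_eq_true]
  constructor
  · rintro ⟨l, ⟨r, hr, rfl⟩, hk⟩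
    rcases List.mem_map.1 hk with ⟨m, hm, hmk⟩
    rcases List.mem_filter.1 hm with ⟨hmr, hz⟩
    have : m = k := by simpa using hmk
    subst this
    exact ⟨List.mem_range.1 hmr, r, hr, hz⟩
  · rintro ⟨hkn, r, hr, hz⟩
    exact ⟨_, ⟨r, hr, rfl⟩, List.mem_map.2 ⟨k, List.mem_filter.2 ⟨List.mem_range.2 hkn, hz⟩, rfl⟩⟩

lemma colUntilZero_append (j : Nat) (p : List (List Int)) (r : List Int) :
    colUntilZero j (p ++ [r])
    = colUntilZero j p
      + (if zeroInCol p j then 0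
         else if r.getD j 0 = 0 then 0 else r.getD j 0) := by
  induction p with
  | nil =>
    by_cases hr : r.getD j 0 = 0 <;>
      simp only [List.nil_append, colUntilZero, zeroInCol, List.any_nil, hr, if_pos,
        Bool.false_eq_true, if_false, zero_add, add_zero, ite_self]
  | cons q t ih =>
    by_cases hq : q.getD j 0 = 0
    · have hqE : q[j]?.getD 0 = 0 := by rw [← List.getD_eq_getElem?_getD]; exact hq
      have hz : zeroInCol (q :: t) j = true := by simp [zeroInCol, hqE]
      simp only [List.cons_append, colUntilZero, hq, hz, if_pos, add_zero]
    · have hqE : ¬ q[j]?.getD 0 = 0 := by rw [← List.getD_eq_getElem?_getD]; exact hq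
      have hz : zeroInCol (q :: t) j = zeroInCol t j := by simp [zeroInCol, hqE]
      simp only [List.cons_append, colUntilZero, if_neg hq, ih, hz]
      ring

lemma sum_map_filter_eq (l : List Nat) (c : Nat → Bool) (v : Nat → Int) :
    ((l.filter c).map v).sum = (l.map (fun k => if c k then v k else 0)).sum := by
  induction l with
  | nil => simp
  | cons a t ih =>
    by_cases h : c a <;> simp [h, ih]

lemma main_lemma (n : Nat) (rows : List (List Int)) :
    (Astate n rows).1 = ((List.range n).map (fun j => colUntilZero j rows)).sum := by
  induction rows using List.reverseRecOn with
  | nil => simp [Astate, colUntilZero]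
  | append_singleton p r ih =>
    have hstep : (Astate n (p ++ [r])).1
        = (Astate n p).1 + rowAdd n r ((Astate n p).2 ++ zr n r) := by
      simp [Astate, List.foldl_append]
    have hinc : rowAdd n r ((p.map (zr n)).flatten ++ zr n r)
        = ((List.range n).map (fun j =>
            if zeroInCol p j then 0 else if r.getD j 0 = 0 then 0 else r.getD j 0)).sum := by
      unfold rowAdd
      rw [sum_map_filter_eq]
      apply congrArg List.sum
      apply List.map_congr_left
      intro k hk
      have hkn : k < n := List.mem_range.1 hk
      have hmem : ((k : Int) ∈ (p.map (zr n)).flatten ++ zr n r)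
          ↔ (zeroInCol p k = true ∨ r.getD k 0 = 0) := by
        have h2 := mem_flat_zr n (p ++ [r]) k
        rw [List.map_append, List.flatten_append] at h2
        have h3 : zeroInCol (p ++ [r]) k = (zeroInCol p k || (r.getD k 0 == 0)) := by
          simp [zeroInCol, List.any_append, List.getD_eq_getElem?_getD]
        rw [h3] at h2
        simp only [List.map_cons, List.map_nil, List.flatten_cons, List.flatten_nil,
          List.append_nil] at h2
        simp [h2, hkn]
      by_cases hz : zeroInCol p k = true
      · simp [hmem, hz]
      · simp [hmem, hz]
    have hsplit : ((List.range n).map (fun j => colUntilZero j (p ++ [r]))).sum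
        = ((List.range n).map (fun j => colUntilZero j p)).sum
          + ((List.range n).map (fun j =>
              if zeroInCol p j then 0 else if r.getD j 0 = 0 then 0 else r.getD j 0)).sum := by
      rw [List.map_congr_left (fun j _ => colUntilZero_append j p r)]
      rw [PySem.List.sum_map_add_int]
    rw [hstep, Astate_snd, hinc, hsplit, ih]

-- ===== VERDICT (by name: the statement is the Claim_ definition above) =====
theorem solution_spec : Claim_equal_solution := by
  intro matrix _ _
  unfold Spec_solution
  by_cases hm : matrix = []
  · subst hm; decide
  · rw [solution_eq_Astate, main_lemma]
    unfold solution_alt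
    rw [if_neg hm, PySem.List.foldl_add]
    simp
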